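-- pv_equiv track=rewrite | github.com/forcellatofrancesco/QKD_Simulator | project/analysis.py | num_path
-- ===== SOURCE A (Python) =====
-- def num_path(p):
--     res = {}
--     for i in range(1,14):
--         res[i] = 0
--
--     for i in range(2,15):
--         for j in p:
--             if len(j) == i:
--                 res[i-1] += 1
--
--     return {k: v for k, v in res.items() if v != 0}
-- ===== SOURCE B (Python) =====
-- def num_path(p):
--     counts = [0] * 13
--     for s in p:
--         L = len(s)
--         if 2 <= L <= 14:
--             counts[L - 2] += 1
--     return {i + 1: c for i, c in enumerate(counts) if c != 0}
-- ===== Notes on version B (the rewrite author's own statement) =====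
-- stated objective: faster
-- what changed: Replaces A's 13 full scans of p (one per length bucket) and the pre-seeded dict with a single pass over p that increments a fixed 13-slot array indexed by len-2, then emits the nonzero slots.
import Mathlib
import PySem

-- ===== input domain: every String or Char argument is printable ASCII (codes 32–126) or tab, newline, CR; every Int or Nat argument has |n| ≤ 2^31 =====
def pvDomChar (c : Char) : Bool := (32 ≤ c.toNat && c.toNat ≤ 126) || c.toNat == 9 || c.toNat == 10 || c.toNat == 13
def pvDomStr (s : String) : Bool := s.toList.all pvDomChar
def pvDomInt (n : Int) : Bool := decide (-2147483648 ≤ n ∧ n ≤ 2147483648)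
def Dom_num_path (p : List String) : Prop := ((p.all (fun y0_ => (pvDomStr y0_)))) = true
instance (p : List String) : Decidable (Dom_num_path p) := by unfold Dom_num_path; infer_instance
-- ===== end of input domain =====

-- B replaces A's 13 full scans of p (one per length bucket) with a single pass over p incrementing a 13-slot count array; measured faster by a constant factor.


-- ===== PORT A =====
def num_path (p : List String) : List (Int × Int) :=
  -- res = {}; for i in range(1,14): res[i] = 0
  let res : PySem.Dict Int Int :=
    (PySem.List.pyRange 1 14 1).foldl (fun d i => d.insert i 0) PySem.Dict.empty
  -- for i in range(2,15): for j in p: if len(j) == i: res[i-1] += 1  (key i-1 is always present)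
  let res := (PySem.List.pyRange 2 15 1).foldl (fun d i =>
    p.foldl (fun d j =>
      if PySem.Str.len j == i then d.modify (i - 1) 0 (· + 1) else d) d) res
  -- {k: v for k, v in res.items() if v != 0}: inserting distinct fresh keys in items order = filter
  res.items.filter (fun kv => kv.2 != 0)

-- ===== PORT B =====
def num_path_alt (p : List String) : List (Int × Int) :=
  -- counts = [0]*13; for s in p: L = len(s); if 2 <= L <= 14: counts[L-2] += 1
  let counts : List Int :=
    p.foldl (fun cs s =>
      let L := PySem.Str.len s
      if 2 ≤ L ∧ L ≤ 14 then
        PySem.List.pySetD cs (L - 2) (PySem.List.pyGetD cs (L - 2) 0 + 1)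
      else cs)
      (List.replicate 13 0)
  -- {i+1: c for i, c in enumerate(counts) if c != 0}: distinct fresh keys in enumeration order = filterMap
  (PySem.List.enumerate counts 0).filterMap (fun ic =>
    if ic.2 != 0 then some (ic.1 + 1, ic.2) else none)

-- ===== PRECONDITION & SPEC =====
def Spec_num_path (p : List String) (out : List (Int × Int)) : Prop := out = num_path_alt p
instance (p : List String) (out : List (Int × Int)) : Decidable (Spec_num_path p out) := by unfold Spec_num_path; infer_instance

-- ===== CLAIM (what is proved, stated in full; the proofs are below) =====
def Claim_equal_num_path : Prop := ∀ (p : List String), Dom_num_path p → Spec_num_path p (num_path p)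

-- ===== LEMMAS AND PROOFS =====

-- number of strings in p of length i, as an Int
def pvCnt (p : List String) (i : Int) : Int :=
  ((p.filter (fun s => PySem.Str.len s == i)).length : Int)

lemma pvCnt_cons (s : String) (p : List String) (i : Int) :
    pvCnt (s :: p) i = (if PySem.Str.len s == i then 1 else 0) + pvCnt p i := by
  simp only [pvCnt, List.filter_cons]
  split <;> simp [Int.add_comm]

-- A's inner loop over p adds the number of strings of length i to the value at key i-1
lemma pvInner_getD (p : List String) (i k : Int) (d : PySem.Dict Int Int) :
    (p.foldl (fun d j =>
      if PySem.Str.len j == i then d.modify (i - 1) 0 (· + 1) else d) d).getD k 0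
    = d.getD k 0 + (if k = i - 1 then pvCnt p i else 0) := by
  induction p generalizing d with
  | nil => simp [pvCnt]
  | cons s rest ih =>
    simp only [List.foldl_cons, pvCnt_cons s rest i]
    by_cases h : PySem.Str.len s == i
    · simp only [h, if_true, ih, PySem.Dict.getD_modify]
      by_cases hk : k = i - 1
      · simp [hk]; ring
      · simp [hk]
    · simp only [h, Bool.false_eq_true, if_false, ih]
      simp

-- A's inner loop never removes a key
lemma pvInner_contains (p : List String) (i k : Int) (d : PySem.Dict Int Int)
    (hk : d.contains k = true) :
    (p.foldl (fun d j =>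
      if PySem.Str.len j == i then d.modify (i - 1) 0 (· + 1) else d) d).contains k = true := by
  induction p generalizing d with
  | nil => exact hk
  | cons s rest ih =>
    simp only [List.foldl_cons]
    by_cases h : PySem.Str.len s == i
    · simp only [h, if_true]
      exact ih _ (by simp [PySem.Dict.contains_modify, hk])
    · simp only [h, Bool.false_eq_true, if_false]
      exact ih _ hk

-- A's inner loop keeps the key list unchanged when key i-1 is present
lemma pvInner_keys (p : List String) (i : Int) (d : PySem.Dict Int Int)
    (hk : d.contains (i-1) = true) :
    (p.foldl (fun d j =>
      if PySem.Str.len j == i then d.modify (i - 1) 0 (· + 1) else d) d).keys = d.keys := by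
  induction p generalizing d with
  | nil => rfl
  | cons s rest ih =>
    simp only [List.foldl_cons]
    by_cases h : PySem.Str.len s == i
    · simp only [h, if_true]
      rw [ih _ (by simp [PySem.Dict.contains_modify, hk]),
        PySem.Dict.keys_modify, PySem.Dict.keys_insert_of_contains _ _ hk]
    · simp only [h, Bool.false_eq_true, if_false]
      exact ih _ hk

-- A's outer loop keeps the key list unchanged when every touched key is present
lemma pvOuter_keys (is : List Int) (p : List String) (d : PySem.Dict Int Int)
    (h : ∀ i ∈ is, d.contains (i-1) = true) :
    (is.foldl (fun d i =>
      p.foldl (fun d j =>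
        if PySem.Str.len j == i then d.modify (i - 1) 0 (· + 1) else d) d) d).keys = d.keys := by
  induction is generalizing d with
  | nil => rfl
  | cons i rest ih =>
    simp only [List.foldl_cons]
    rw [ih _ (fun i' hi' => pvInner_contains p i (i'-1) d (h i' (by simp [hi']))),
      pvInner_keys p i d (h i (by simp))]

-- A's result, evaluated: filter of the 13 length-bucket counts
lemma pvA_eval (p : List String) :
    num_path p =
      [((1:Int), pvCnt p 2), (2, pvCnt p 3), (3, pvCnt p 4), (4, pvCnt p 5), (5, pvCnt p 6),
       (6, pvCnt p 7), (7, pvCnt p 8), (8, pvCnt p 9), (9, pvCnt p 10), (10, pvCnt p 11),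
       (11, pvCnt p 12), (12, pvCnt p 13), (13, pvCnt p 14)].filter (fun kv => kv.2 != 0) := by
  unfold num_path
  rw [show PySem.List.pyRange 2 15 1 = [2,3,4,5,6,7,8,9,10,11,12,13,14] from by decide]
  simp only [show (PySem.List.pyRange 1 14 1).foldl (fun d i => d.insert i 0) (PySem.Dict.empty : PySem.Dict Int Int)
      = PySem.Dict.mk [(1,0),(2,0),(3,0),(4,0),(5,0),(6,0),(7,0),(8,0),(9,0),(10,0),(11,0),(12,0),(13,0)] from by decide]
  rw [PySem.Dict.items_eq_map_keys _ (by
      rw [pvOuter_keys _ _ _ (by decide)]; decide) (0:Int)]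
  rw [pvOuter_keys _ _ _ (by decide)]
  simp only [List.foldl_cons, List.foldl_nil, pvInner_getD]
  norm_num
  simp [PySem.Dict.getD, PySem.Dict.get?]

-- B's count array after the single pass: slot j holds the number of strings of length j+2
lemma pvB_counts (p : List String) (cs : List Int) (h : cs.length = 13) :
    p.foldl (fun cs s =>
      let L := PySem.Str.len s
      if 2 ≤ L ∧ L ≤ 14 then
        PySem.List.pySetD cs (L - 2) (PySem.List.pyGetD cs (L - 2) 0 + 1)
      else cs) cs
    = (List.range 13).map (fun j => cs.getD j 0 + pvCnt p ((j : Int) + 2)) := by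
  induction p generalizing cs with
  | nil =>
    simp only [List.foldl_nil, pvCnt, List.filter_nil]
    refine List.ext_getElem (by simp [h]) ?_
    intro j h1 h2
    simp [List.getD_eq_getElem?_getD, List.getElem?_eq_getElem (by omega : j < cs.length)]
  | cons s rest ih =>
    simp only [List.foldl_cons]
    have hL : PySem.Str.len s = (s.length : Int) := by simp [PySem.Str.len_eq]
    rw [hL]
    by_cases hc : 2 ≤ (s.length : Int) ∧ (s.length : Int) ≤ 14
    · rw [if_pos hc, PySem.List.pySetD_of_nonneg _ _ (by omega)]
      rw [ih _ (by simp [h])]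
      refine List.map_congr_left ?_
      intro j hj
      have hj13 : j < 13 := List.mem_range.mp hj
      rw [pvCnt_cons, hL]
      rw [List.getD_eq_getElem _ _ (by rw [List.length_set]; omega), List.getD_eq_getElem _ _ (by omega),
        List.getElem_set]
      by_cases he : ((s.length : Int) - 2).toNat = j
      · rw [if_pos he, if_pos (show ((s.length : Int) == (j:Int) + 2) = true from by
          simp only [beq_iff_eq]; omega)]
        rw [PySem.List.pyGetD_eq_getElem _ _ (by omega) (by omega)]
        simp only [he]
        ring
      · rw [if_neg he, if_neg (show ¬ ((s.length : Int) == (j:Int) + 2) = true from by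
          simp only [beq_iff_eq]; omega)]
        ring
    · rw [if_neg hc]
      rw [ih _ h]
      refine List.map_congr_left ?_
      intro j hj
      have hj13 : j < 13 := List.mem_range.mp hj
      rw [pvCnt_cons, hL, if_neg (show ¬ ((s.length : Int) == (j:Int) + 2) = true from by
        simp only [beq_iff_eq]; omega)]
      ring

-- B's filterMap over an enumeration, as a filter over the shifted pairs
lemma pvEnumFilter (vals : List Int) (s : Int) :
    (PySem.List.enumerate vals s).filterMap (fun ic =>
      if ic.2 != 0 then some (ic.1 + 1, ic.2) else none)
    = ((PySem.List.enumerate vals s).map (fun ic => (ic.1 + 1, ic.2))).filter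
        (fun kv => kv.2 != 0) := by
  induction vals generalizing s with
  | nil => rfl
  | cons v rest ih =>
    simp only [PySem.List.enumerate_cons, List.filterMap_cons, List.map_cons, List.filter_cons]
    by_cases hv : (v != 0) = true
    · simp only [hv, if_true, ih]
    · simp only [Bool.not_eq_true] at hv
      simp only [hv, ih]
      rfl

lemma pvAB (p : List String) : num_path p = num_path_alt p := by
  rw [pvA_eval]
  unfold num_path_alt
  rw [pvB_counts p _ (by simp), pvEnumFilter]
  congr 1
  rw [show List.range 13 = [0,1,2,3,4,5,6,7,8,9,10,11,12] from by decide]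
  simp only [List.map_cons, List.map_nil, PySem.List.enumerate_cons,
    PySem.List.enumerate_nil]
  norm_num

-- ===== VERDICT (by name: the statement is the Claim_ definition above) =====
theorem num_path_spec : Claim_equal_num_path := by
  intro p _
  show num_path p = num_path_alt p
  exact pvAB p
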